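-- pv_equiv track=rewrite | github.com/CBIR-LL/RepVGG-caffe | gen_merged_model.py | analysis_network
-- ===== SOURCE A (Python) =====
-- def analysis_network(num_blocks):
--     layer_number = 0
--     layer_3x3_1x1 = []
--     layer_count = []
--     for i, layer_in_block in enumerate(num_blocks):
--         layer_count.append(2*layer_number + 1)
--         layer_3x3_1x1.append("conv" + str(2*layer_number + 1))
--         layer_number += layer_in_block
--     return layer_3x3_1x1, layer_count
-- ===== SOURCE B (Python) =====
-- def analysis_network(num_blocks):
--     # Divide and conquer: solve each half independently, then splice -
--     # the right half's counts are the same list shifted by 2*(layers in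
--     # the left half).  solve returns (counts, total_blocks).
--     def solve(blocks):
--         if not blocks:
--             return [], 0
--         if len(blocks) == 1:
--             return [1], blocks[0]
--         m = len(blocks) // 2
--         lc, ls = solve(blocks[:m])
--         rc, rs = solve(blocks[m:])
--         return lc + [c + 2 * ls for c in rc], ls + rs
--     layer_count, _ = solve(num_blocks)
--     layer_3x3_1x1 = ["conv" + str(c) for c in layer_count]
--     return layer_3x3_1x1, layer_count
-- ===== Notes on version B (the rewrite author's own statement) =====
-- stated objective: alternative
-- what changed: Replaces the forward loop with a running layer counter by a divide-and-conquer: recursively solve each half of the list and splice the results, shifting the right half's counts by twice the left half's block total; the name list is derived from the finished counts.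
import Mathlib
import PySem

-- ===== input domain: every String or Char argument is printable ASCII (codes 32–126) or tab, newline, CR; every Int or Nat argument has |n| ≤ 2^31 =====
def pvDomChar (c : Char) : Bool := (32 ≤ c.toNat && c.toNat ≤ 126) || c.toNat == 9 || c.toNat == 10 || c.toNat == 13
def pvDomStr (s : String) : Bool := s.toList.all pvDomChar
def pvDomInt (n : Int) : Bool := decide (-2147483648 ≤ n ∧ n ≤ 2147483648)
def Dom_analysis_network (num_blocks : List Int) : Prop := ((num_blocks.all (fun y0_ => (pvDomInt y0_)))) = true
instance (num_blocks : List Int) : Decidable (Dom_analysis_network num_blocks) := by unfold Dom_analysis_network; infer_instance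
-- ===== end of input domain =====

-- B replaces A's forward running-counter loop by a divide-and-conquer on the
-- list (solve halves, shift the right half's counts); alternative decomposition.


-- ===== PORT A =====
-- single forward pass with a running layer_number, appending to both result lists
def analysis_network (num_blocks : List Int) : List String × List Int :=
  let st := num_blocks.foldl
    (fun (s : Int × List String × List Int) layer_in_block =>
      (s.1 + layer_in_block,
       s.2.1 ++ ["conv" ++ PySem.Int.toStr (2 * s.1 + 1)],
       s.2.2 ++ [2 * s.1 + 1]))
    (0, [], [])
  (st.2.1, st.2.2)

-- ===== PORT B =====
-- Source B's `solve`: divide and conquer, returns (counts, total blocks);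
-- blocks[0] on the singleton branch is exact as headI (the list is nonempty there)
def pvSolve (blocks : List Int) : List Int × Int :=
  if _h1 : blocks = [] then ([], 0)
  else if _h2 : blocks.length = 1 then ([1], blocks.headI)
  else
    let m := blocks.length / 2
    let l := pvSolve (blocks.take m)
    let r := pvSolve (blocks.drop m)
    (l.1 ++ r.1.map (fun c => c + 2 * l.2), l.2 + r.2)
termination_by blocks.length
decreasing_by
  all_goals
    have hlen : 2 ≤ blocks.length := by
      rcases blocks with _ | ⟨x, _ | ⟨y, ys⟩⟩
      · exact absurd rfl _h1
      · exact absurd rfl _h2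
      · simp
    simp only [List.length_take, List.length_drop]
    omega

def analysis_network_alt (num_blocks : List Int) : List String × List Int :=
  let layer_count := (pvSolve num_blocks).1
  (layer_count.map (fun c => "conv" ++ PySem.Int.toStr c), layer_count)

-- ===== PRECONDITION & SPEC =====
def Spec_analysis_network (num_blocks : List Int) (out : List String × List Int) : Prop := out = analysis_network_alt num_blocks
instance (num_blocks : List Int) (out : List String × List Int) : Decidable (Spec_analysis_network num_blocks out) := by unfold Spec_analysis_network; infer_instance

-- ===== CLAIM (what is proved, stated in full; the proofs are below) =====
def Claim_equal_analysis_network : Prop := ∀ (num_blocks : List Int), Dom_analysis_network num_blocks → Spec_analysis_network num_blocks (analysis_network num_blocks)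

-- ===== LEMMAS AND PROOFS =====
-- exclusive prefix sums starting at t: common characterisation of both programs
def pvOffsets (t : Int) : List Int → List Int
  | [] => []
  | x :: xs => t :: pvOffsets (t + x) xs

theorem analysis_network_foldl (nb : List Int) (ln : Int) (l31 : List String) (lc : List Int) :
    nb.foldl
      (fun (s : Int × List String × List Int) layer_in_block =>
        (s.1 + layer_in_block,
         s.2.1 ++ ["conv" ++ PySem.Int.toStr (2 * s.1 + 1)],
         s.2.2 ++ [2 * s.1 + 1]))
      (ln, l31, lc) =
    (ln + nb.sum,
     l31 ++ (pvOffsets ln nb).map (fun o => "conv" ++ PySem.Int.toStr (2 * o + 1)),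
     lc ++ (pvOffsets ln nb).map (fun o => 2 * o + 1)) := by
  induction nb generalizing ln l31 lc with
  | nil => simp [pvOffsets]
  | cons x xs ih =>
    simp only [List.foldl_cons, List.sum_cons, pvOffsets, List.map_cons, ih,
      List.append_assoc, List.singleton_append, Prod.mk.injEq, and_true]
    ring

theorem pvOffsets_append (a b : List Int) (t : Int) :
    pvOffsets t (a ++ b) = pvOffsets t a ++ pvOffsets (t + a.sum) b := by
  induction a generalizing t with
  | nil => simp [pvOffsets]
  | cons x xs ih => simp [pvOffsets, ih, add_assoc]

theorem pvOffsets_shift (xs : List Int) (t s : Int) :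
    pvOffsets (t + s) xs = (pvOffsets t xs).map (fun o => o + s) := by
  induction xs generalizing t with
  | nil => simp [pvOffsets]
  | cons x xs ih =>
    simp only [pvOffsets, List.map_cons, List.cons.injEq, true_and]
    rw [← ih (t + x)]
    ring_nf

theorem pvSolve_eq_aux (n : Nat) : ∀ nb : List Int, nb.length ≤ n →
    pvSolve nb = ((pvOffsets 0 nb).map (fun o => 2 * o + 1), nb.sum) := by
  induction n with
  | zero =>
    intro nb hlen
    have hnil : nb = [] := by cases nb with | nil => rfl | cons x xs => simp at hlen
    subst hnil
    simp [pvSolve, pvOffsets]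
  | succ n ih =>
    intro nb hlen
    by_cases h1 : nb = []
    · subst h1; simp [pvSolve, pvOffsets]
    · by_cases h2 : nb.length = 1
      · obtain ⟨x, hx⟩ : ∃ x, nb = [x] := by
          cases nb with
          | nil => exact absurd rfl h1
          | cons y ys => cases ys with
            | nil => exact ⟨y, rfl⟩
            | cons z zs => simp at h2
        subst hx
        simp [pvSolve, pvOffsets]
      · have hge : 2 ≤ nb.length := by
          cases nb with
          | nil => exact absurd rfl h1
          | cons y ys => cases ys with
            | nil => exact absurd rfl h2
            | cons z zs => simp
        rw [pvSolve]
        simp only [dif_neg h1, dif_neg h2]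
        rw [ih (nb.take (nb.length / 2)) (by simp [List.length_take]; omega),
            ih (nb.drop (nb.length / 2)) (by simp [List.length_drop]; omega)]
        conv_rhs => rw [show nb = nb.take (nb.length / 2) ++ nb.drop (nb.length / 2)
          from (List.take_append_drop _ nb).symm]
        rw [pvOffsets_append, List.map_append, List.sum_append]
        refine congrArg₂ _ (congrArg₂ _ rfl ?_) rfl
        rw [show (0 : Int) + (nb.take (nb.length / 2)).sum
              = 0 + (nb.take (nb.length / 2)).sum from rfl,
            pvOffsets_shift]
        simp only [List.map_map]
        congr 1
        funext o
        simp only [Function.comp]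
        ring

theorem pvSolve_eq (nb : List Int) :
    pvSolve nb = ((pvOffsets 0 nb).map (fun o => 2 * o + 1), nb.sum) :=
  pvSolve_eq_aux nb.length nb le_rfl

-- ===== VERDICT (by name: the statement is the Claim_ definition above) =====
theorem analysis_network_spec : Claim_equal_analysis_network := by
  intro nb _
  show _ = _
  simp [analysis_network, analysis_network_alt, analysis_network_foldl,
    pvSolve_eq, List.map_map, Function.comp]
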